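-- pv_equiv track=rewrite | github.com/seongcheollee/Algorithm_python | 프로그래머스/lv2/131127. 할인 행사/할인 행사.py | solution
-- ===== SOURCE A (Python) =====
-- def solution(want, number, discount):
--     cnt = 0
--     dic = {}
--     dis_len = len(discount) # discount 길이
--     l = sum(number) # 사야 할 상품의 총 개수
--
--     # want number -> dict()
--     # dic.update(zip(want, number)) 딕셔너리 정의 함수
--     for i in range(len(want)):
--         dic[want[i]] = number[i]
--
--     # 필요(최소) 반복 횟수 discount의 길이
--     # discount의 길이를 1씩 줄여나가면서 want의 품목이 모두 있는지 확인.
--     for i in range(dis_len):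
--
--         # 탐색 길이가 요구 길이 보다 작을 시 값 리턴
--         if i + l > dis_len:
--             return cnt
--
--         n_dis = discount[i:i+l]
--         # 구매한 항목 변수 초기화
--         parchase = 0
--         for p in dic:
--             if n_dis.count(p) == dic[p]:
--                 parchase += 1
--
--         # 모든 항목 구매시 cnt + 1
--         if parchase == len(dic):
--             cnt += 1
--
--     return cnt
-- ===== SOURCE B (Python) =====
-- def solution(want, number, discount):
--     # Sliding window: keep per-item counts of the current window incrementally
--     # and compare the whole counter against the requirement each step.
--     need = {k: number[i] for i, k in enumerate(want)}
--     total = sum(number)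
--     n = len(discount)
--     if total > n or total <= 0:
--         # no window of positive length fits (a sliding window needs 0 < total <= n)
--         return 0
--     cur = {k: 0 for k in need}
--     for item in discount[:total]:
--         if item in cur:
--             cur[item] += 1
--     cnt = 1 if cur == need else 0
--     for i in range(total, n):
--         inc = discount[i]
--         if inc in cur:
--             cur[inc] += 1
--         out = discount[i - total]
--         if out in cur:
--             cur[out] -= 1
--         if cur == need:
--             cnt += 1
--     return cnt
-- ===== Notes on version B (the rewrite author's own statement) =====
-- stated objective: alternative
-- what changed: B replaces A's per-start recount (slicing a fresh window and calling .count for every wanted item at every start) by a single sliding-window pass that updates one per-item counter dictionary incrementally and compares it to the requirement dict at each step.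
-- outside the precondition, e.g. on solution([], [], ['a']): A returns 1, B returns 0; on solution(['a'], [0], ['b']): A returns 1, B returns 0; on solution(['a', 'b'], [1], ['a']): A raises IndexError, B raises IndexError
import Mathlib
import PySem

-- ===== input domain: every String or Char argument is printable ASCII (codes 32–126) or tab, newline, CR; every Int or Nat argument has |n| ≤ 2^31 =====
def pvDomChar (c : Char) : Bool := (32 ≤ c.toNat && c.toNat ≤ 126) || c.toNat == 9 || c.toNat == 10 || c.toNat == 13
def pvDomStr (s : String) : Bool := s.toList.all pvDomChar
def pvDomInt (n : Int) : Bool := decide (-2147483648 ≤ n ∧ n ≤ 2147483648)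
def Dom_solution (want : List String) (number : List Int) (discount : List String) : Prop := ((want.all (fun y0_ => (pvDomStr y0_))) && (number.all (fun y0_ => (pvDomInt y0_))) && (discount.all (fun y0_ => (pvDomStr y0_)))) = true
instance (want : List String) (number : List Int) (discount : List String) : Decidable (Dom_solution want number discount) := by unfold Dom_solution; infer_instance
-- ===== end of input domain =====

-- B replaces A's per-start window recount by a single sliding-window pass with an
-- incremental per-item counter dict; equivalence is about the return value.

-- ===== PORT A =====
-- the 'for i in range(dis_len)' loop with its early 'return cnt', one fuel step per iteration
def solutionGo (dic : PySem.Dict String Int) (l disLen : Int) (discount : List String) :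
    Nat → Int → Int → Int
  | 0, _, cnt => cnt
  | fuel+1, i, cnt =>
    if i + l > disLen then cnt
    else
      let n_dis := PySem.List.slice discount (some i) (some (i + l))
      let parchase := dic.keys.foldl
        (fun acc p => if (n_dis.count p : Int) = dic.getD p 0 then acc + 1 else acc) (0 : Int)
      solutionGo dic l disLen discount fuel (i+1)
        (if parchase = (dic.size : Int) then cnt + 1 else cnt)

def solution (want : List String) (number : List Int) (discount : List String) : Int :=
  let cnt : Int := 0
  let disLen : Int := discount.length
  let l : Int := number.sum
  let dic : PySem.Dict String Int :=
    (PySem.List.pyRange 0 (want.length : Int) 1).foldl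
      (fun d i => d.insert (PySem.List.pyGetD want i "") (PySem.List.pyGetD number i 0))
      PySem.Dict.empty
  solutionGo dic l disLen discount disLen.toNat 0 cnt


-- ===== PORT B =====
-- Python's 'cur == need' on dicts (order-insensitive equality)
def pyDictEq (d1 d2 : PySem.Dict String Int) : Bool :=
  d1.size == d2.size && d1.items.all (fun p => d2.get? p.1 == some p.2)

def slideStep (need : PySem.Dict String Int) (total : Int) (discount : List String)
    (st : PySem.Dict String Int × Int) (i : Int) : PySem.Dict String Int × Int :=
  let inc := PySem.List.pyGetD discount i ""
  let c1 := if st.1.contains inc then st.1.modify inc 0 (· + 1) else st.1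
  let out := PySem.List.pyGetD discount (i - total) ""
  let c2 := if c1.contains out then c1.modify out 0 (· - 1) else c1
  (c2, if pyDictEq c2 need then st.2 + 1 else st.2)

def solution_alt (want : List String) (number : List Int) (discount : List String) : Int :=
  let need : PySem.Dict String Int :=
    (PySem.List.enumerate want).foldl
      (fun d p => d.insert p.2 (PySem.List.pyGetD number p.1 0)) PySem.Dict.empty
  let total : Int := number.sum
  let n : Int := discount.length
  if total > n ∨ total ≤ 0 then 0
  else
    let cur0 : PySem.Dict String Int :=
      need.keys.foldl (fun d k => d.insert k (0 : Int)) PySem.Dict.empty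
    let cur1 := (PySem.List.slice discount none (some total)).foldl
      (fun d item => if d.contains item then d.modify item 0 (· + 1) else d) cur0
    let cnt0 : Int := if pyDictEq cur1 need then 1 else 0
    ((PySem.List.pyRange total n 1).foldl (slideStep need total discount) (cur1, cnt0)).2


-- ===== PRECONDITION & SPEC =====
-- Pre_ restricts to the task's natural domain: enough purchase counts for every wanted item
-- (A raises IndexError when len(number) < len(want)) and a positive total purchase count
-- (sum(number) ≤ 0 asks for windows of nonpositive length, a degenerate corner where A's
-- empty/negative-slice behaviour is an implementation artefact and B simply returns 0).
def Pre_solution (want : List String) (number : List Int) (discount : List String) : Prop :=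
  want.length ≤ number.length ∧ 1 ≤ number.sum
instance (want : List String) (number : List Int) (discount : List String) :
    Decidable (Pre_solution want number discount) := by unfold Pre_solution; infer_instance

def pvWitness_solution : List String × List Int × List String := (["a"], [1], ["a", "b"])

def Spec_solution (want : List String) (number : List Int) (discount : List String) (out : Int) : Prop := out = solution_alt want number discount
instance (want : List String) (number : List Int) (discount : List String) (out : Int) : Decidable (Spec_solution want number discount out) := by unfold Spec_solution; infer_instance

-- ===== CLAIM (what is proved, stated in full; the proofs are below) =====
def Claim_equal_solution : Prop := ∀ (want : List String) (number : List Int) (discount : List String), Dom_solution want number discount → Pre_solution want number discount → Spec_solution want number discount (solution want number discount)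


-- ===== LEMMAS AND PROOFS =====
def wcnt (discount : List String) (t s : Nat) (k : String) : Nat :=
  ((discount.drop s).take t).count k

theorem wcnt_succ (discount : List String) (t s : Nat) (ht : 1 ≤ t)
    (hs : t + s < discount.length) (k : String) :
    (wcnt discount t (s+1) k : Int)
      = (wcnt discount t s k : Int)
        + (if discount[t + s]'hs = k then 1 else 0)
        - (if discount[s]'(by omega) = k then 1 else 0) := by
  obtain ⟨u, rfl⟩ : ∃ u, t = u + 1 := ⟨t - 1, by omega⟩
  have hdrop : discount.drop s = discount[s]'(by omega) :: discount.drop (s+1) :=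
    List.drop_eq_getElem_cons (by omega)
  have hlen : u < (discount.drop (s+1)).length := by
    rw [List.length_drop]; omega
  have htake : (discount.drop (s+1)).take (u+1)
      = (discount.drop (s+1)).take u ++ [discount[(u+1) + s]'hs] := by
    rw [List.take_succ]
    congr 1
    rw [List.getElem?_eq_getElem hlen]
    simp only [Option.toList_some]
    congr 1
    rw [List.getElem_drop]
    congr 1
    omega
  unfold wcnt
  rw [hdrop, List.take_succ_cons, htake]
  rw [List.count_cons, List.count_append]
  by_cases h1 : discount[(u+1) + s]'hs = k <;> by_cases h2 : discount[s]'(by omega) = k <;>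
    simp [h1, h2, List.count_singleton, beq_iff_eq] <;> push_cast <;> ring
def goodW (need : PySem.Dict String Int) (discount : List String) (t s : Nat) : Bool :=
  need.keys.all (fun k => ((wcnt discount t s k : Int) == need.getD k 0))

-- A's per-window membership test, as a Bool (used by the proofs)
def goodA (dic : PySem.Dict String Int) (l : Int) (discount : List String) (j : Int) : Bool :=
  dic.keys.all (fun p =>
    (((PySem.List.slice discount (some j) (some (j + l))).count p : Int) == dic.getD p 0))

theorem dic_eq_need (want : List String) (number : List Int)
    (h : want.length ≤ number.length) :
    (PySem.List.pyRange 0 (want.length : Int) 1).foldl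
      (fun d i => d.insert (PySem.List.pyGetD want i "") (PySem.List.pyGetD number i 0))
      PySem.Dict.empty
    = (want.zip number).foldl (fun d p => d.insert p.1 p.2) PySem.Dict.empty := by
  have hmap : (PySem.List.pyRange 0 (want.length : Int) 1).map
      (fun i => (PySem.List.pyGetD want i "", PySem.List.pyGetD number i 0))
      = want.zip number := by
    apply List.ext_getElem
    · simp [PySem.List.length_pyRange_one, List.length_zip]
      omega
    · intro k h1 h2
      have hk : k < want.length := by
        simpa [PySem.List.length_pyRange_one] using h1
      simp only [List.getElem_map, PySem.List.getElem_pyRange_one, List.getElem_zip]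
      rw [show (0 : Int) + (k : Int) = ((k : Nat) : Int) by omega]
      rw [PySem.List.pyGetD_natCast, PySem.List.pyGetD_natCast]
      rw [List.getD_eq_getElem want "" hk, List.getD_eq_getElem number 0 (by omega)]
  rw [← hmap, List.foldl_map]

theorem solutionGo_spec (dic : PySem.Dict String Int) (l disLen : Int) (discount : List String) :
    ∀ (fuel : Nat) (i cnt : Int),
    solutionGo dic l disLen discount fuel i cnt
      = cnt + ((List.range fuel).countP
          (fun (m : Nat) => decide (i + (m:Int) + l ≤ disLen) && goodA dic l discount (i + (m:Int))) : Int) := by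
  intro fuel
  induction fuel with
  | zero => intro i cnt; simp [solutionGo]
  | succ fuel ih =>
    intro i cnt
    by_cases h : i + l > disLen
    · have hz : ((List.range (fuel + 1)).countP
          (fun (m : Nat) => decide (i + (m:Int) + l ≤ disLen) && goodA dic l discount (i + (m:Int)))) = 0 := by
        apply List.countP_eq_zero.mpr
        intro m _
        have : ¬ (i + (m : Int) + l ≤ disLen) := by omega
        simp [this]
      simp [solutionGo, h, hz]
    · have hle : i + l ≤ disLen := by omega
      simp only [solutionGo, if_neg h]
      rw [ih]
      have hsplit : List.range (fuel + 1) = [0] ++ (List.range fuel).map (fun x => 1 + x) := by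
        rw [Nat.add_comm, List.range_add]; simp
      rw [hsplit, List.countP_append, List.countP_map]
      have hgood : (dic.keys.foldl
          (fun acc p => if (((PySem.List.slice discount (some i) (some (i + l))).count p : Int)
              = dic.getD p 0) then acc + 1 else acc) (0 : Int) = (dic.size : Int))
          ↔ goodA dic l discount i = true := by
        rw [PySem.List.foldl_ite_add_one]
        have hsz : (dic.size : Int) = (dic.keys.length : Int) := by
          simp [PySem.Dict.size, PySem.Dict.keys]
        rw [hsz]
        constructor
        · intro he
          have : dic.keys.countP (fun p =>
              decide (((PySem.List.slice discount (some i) (some (i + l))).count p : Int)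
                = dic.getD p 0)) = dic.keys.length := by omega
          rw [List.countP_eq_length] at this
          simp only [goodA, List.all_eq_true]
          intro p hp
          simpa using this p hp
        · intro hg
          have : ∀ p ∈ dic.keys, (decide (((PySem.List.slice discount (some i) (some (i + l))).count p : Int)
                = dic.getD p 0)) = true := by
            simp only [goodA, List.all_eq_true] at hg
            intro p hp
            simpa using hg p hp
          rw [← List.countP_eq_length] at this
          omega
      have hshift : (List.range fuel).countP
            ((fun (m : Nat) => decide (i + (m:Int) + l ≤ disLen) && goodA dic l discount (i + (m:Int))) ∘ (fun x => 1 + x))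
          = (List.range fuel).countP
            (fun (m : Nat) => decide ((i+1) + (m:Int) + l ≤ disLen) && goodA dic l discount ((i+1) + (m:Int))) := by
        apply List.countP_congr
        intro m _
        have h1 : i + ((1 + m : Nat) : Int) + l = (i+1) + (m:Int) + l := by push_cast; ring
        have h2 : i + ((1 + m : Nat) : Int) = (i+1) + (m:Int) := by push_cast; ring
        simp only [Function.comp_apply, h2]
      rw [hshift]
      by_cases hg : goodA dic l discount i = true
      · rw [if_pos (hgood.mpr hg)]
        simp only [List.countP_cons, List.countP_nil, Nat.cast_zero, add_zero]
        simp only [hle, decide_true, hg, Bool.true_and, if_true]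
        push_cast
        ring
      · rw [if_neg (fun hc => hg (hgood.mp hc))]
        simp only [Bool.not_eq_true] at hg
        simp only [List.countP_cons, List.countP_nil, Nat.cast_zero, add_zero]
        simp only [hg, Bool.and_false, Bool.false_eq_true, if_false]
        push_cast
        ring
theorem guardedFold_keys (xs : List String) :
    ∀ (d : PySem.Dict String Int) (f : Int → Int),
    (xs.foldl (fun d item => if d.contains item then d.modify item 0 f else d) d).keys
      = d.keys := by
  induction xs with
  | nil => intro d f; simp
  | cons x xs ih =>
    intro d f
    simp only [List.foldl_cons]
    by_cases hc : d.contains x = true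
    · rw [if_pos hc, ih]
      rw [PySem.Dict.keys_modify, PySem.Dict.keys_insert_of_contains]
      exact hc
    · rw [if_neg (by simp [hc]), ih]

theorem guardedFold_getD (xs : List String) :
    ∀ (d : PySem.Dict String Int) (k : String), d.contains k = true →
    (xs.foldl (fun d item => if d.contains item then d.modify item 0 (· + 1) else d) d).getD k 0
      = d.getD k 0 + (xs.count k : Int) := by
  induction xs with
  | nil => intro d k _; simp
  | cons x xs ih =>
    intro d k hk
    simp only [List.foldl_cons]
    by_cases hc : d.contains x = true
    · rw [if_pos hc]
      have hk' : (d.modify x 0 (· + 1)).contains k = true := by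
        rw [PySem.Dict.contains_modify]
        simp [hk]
      rw [ih _ k hk']
      by_cases hxk : x = k
      · subst hxk
        rw [PySem.Dict.getD_modify_self]
        simp [List.count_cons_self]
        push_cast
        ring
      · rw [PySem.Dict.getD_modify_of_ne _ _ _ (fun h => hxk h.symm)]
        simp [List.count_cons, Ne.symm hxk, hxk]
    · rw [if_neg (by simp [hc])]
      rw [ih _ k hk]
      have hxk : x ≠ k := fun h => hc (h ▸ hk)
      simp [List.count_cons, Ne.symm hxk, hxk]

theorem pyDictEq_iff (d1 d2 : PySem.Dict String Int)
    (hk : d1.keys = d2.keys) (hn : d2.keys.Nodup) :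
    pyDictEq d1 d2 = true ↔ ∀ k ∈ d2.keys, d1.getD k 0 = d2.getD k 0 := by
  have hn1 : d1.keys.Nodup := hk ▸ hn
  have hsz : (d1.size == d2.size) = true := by
    have h1 : d1.size = d1.keys.length := by simp [PySem.Dict.size, PySem.Dict.keys]
    have h2 : d2.size = d2.keys.length := by simp [PySem.Dict.size, PySem.Dict.keys]
    simp [h1, h2, hk]
  unfold pyDictEq
  rw [hsz, Bool.true_and]
  rw [PySem.Dict.items_eq_map_keys d1 hn1 0]
  rw [List.all_eq_true]
  constructor
  · intro h k hkm
    have := h (k, d1.getD k 0) (by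
      rw [List.mem_map]
      exact ⟨k, hk ▸ hkm, rfl⟩)
    simp only at this
    have hsome : d2.get? k = some (d1.getD k 0) := by simpa using this
    exact ((PySem.Dict.getD_of_get?_eq_some d2 0 hsome)).symm
  · intro h p hp
    rw [List.mem_map] at hp
    obtain ⟨k, hkm, rfl⟩ := hp
    have hkm2 : k ∈ d2.keys := hk ▸ hkm
    have hne : d2.get? k ≠ none := by
      rw [Ne, PySem.Dict.get?_eq_none_iff_not_mem_keys]
      simp [hkm2]
    obtain ⟨v, hv⟩ := Option.ne_none_iff_exists'.mp hne
    have hgd : d2.getD k 0 = v := PySem.Dict.getD_of_get?_eq_some d2 0 hv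
    simp only [hv]
    simp [h k hkm2, hgd]

theorem gupdate_keys (d : PySem.Dict String Int) (x : String) (f : Int → Int) :
    (if d.contains x then d.modify x 0 f else d).keys = d.keys := by
  by_cases hc : d.contains x = true
  · rw [if_pos hc, PySem.Dict.keys_modify, PySem.Dict.keys_insert_of_contains]
    exact hc
  · rw [if_neg (by simp [hc])]

theorem gupdate_getD (d : PySem.Dict String Int) (x : String) (f : Int → Int)
    (k : String) (hk : k ∈ d.keys) :
    (if d.contains x then d.modify x 0 f else d).getD k 0
      = if x = k then f (d.getD k 0) else d.getD k 0 := by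
  by_cases hc : d.contains x = true
  · rw [if_pos hc]
    by_cases hxk : x = k
    · subst hxk
      rw [if_pos rfl, PySem.Dict.getD_modify_self]
    · rw [if_neg hxk, PySem.Dict.getD_modify_of_ne _ _ _ (fun h => hxk h.symm)]
  · rw [if_neg (by simp [hc])]
    have hxk : x ≠ k := by
      intro h
      subst h
      rw [PySem.Dict.contains_eq_decide_mem_keys] at hc
      simp [hk] at hc
    rw [if_neg hxk]

theorem slide_spec (need : PySem.Dict String Int) (discount : List String) (t : Nat)
    (ht : 1 ≤ t) (hn : need.keys.Nodup)
    (c0 : PySem.Dict String Int) (z : Int)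
    (hck : c0.keys = need.keys)
    (hcv : ∀ k ∈ need.keys, c0.getD k 0 = (wcnt discount t 0 k : Int)) :
    ∀ (m : Nat), t + m ≤ discount.length →
      (((PySem.List.pyRange (t:Int) ((t:Int) + (m:Int)) 1).foldl
          (slideStep need (t:Int) discount) (c0, z)).1.keys = need.keys)
      ∧ (∀ k ∈ need.keys,
          ((PySem.List.pyRange (t:Int) ((t:Int) + (m:Int)) 1).foldl
            (slideStep need (t:Int) discount) (c0, z)).1.getD k 0 = (wcnt discount t m k : Int))
      ∧ ((PySem.List.pyRange (t:Int) ((t:Int) + (m:Int)) 1).foldl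
            (slideStep need (t:Int) discount) (c0, z)).2
          = z + ((List.range m).countP (fun j => goodW need discount t (j+1)) : Int) := by
  intro m
  induction m with
  | zero =>
    intro _
    rw [show ((t:Int) + ((0:Nat):Int)) = (t:Int) by simp]
    rw [PySem.List.pyRange_one_eq_nil (le_refl _)]
    refine ⟨hck, ?_, by simp⟩
    intro k hk
    simpa using hcv k hk
  | succ m ih =>
    intro hm
    obtain ⟨ihk, ihv, ihc⟩ := ih (by omega)
    rw [show ((t:Int) + ((m+1:Nat):Int)) = ((t:Int) + (m:Int)) + 1 by push_cast; ring]
    rw [PySem.List.pyRange_one_succ_right (by omega), List.foldl_append]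
    set st := (PySem.List.pyRange (t:Int) ((t:Int) + (m:Int)) 1).foldl
        (slideStep need (t:Int) discount) (c0, z) with hst
    simp only [List.foldl_cons, List.foldl_nil]
    have htm : t + m < discount.length := by omega
    have hmlen : m < discount.length := by omega
    have hinc : PySem.List.pyGetD discount ((t:Int) + (m:Int)) "" = discount[t + m]'htm := by
      rw [show ((t:Int) + (m:Int)) = ((t + m : Nat) : Int) by push_cast; ring]
      rw [PySem.List.pyGetD_natCast]
      exact List.getD_eq_getElem discount "" htm
    have hout : PySem.List.pyGetD discount ((t:Int) + (m:Int) - (t:Int)) "" = discount[m]'hmlen := by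
      rw [show ((t:Int) + (m:Int) - (t:Int)) = ((m : Nat) : Int) by push_cast; ring]
      rw [PySem.List.pyGetD_natCast]
      exact List.getD_eq_getElem discount "" hmlen
    -- unfold one step
    set c1 := if st.1.contains (discount[t + m]'htm)
        then st.1.modify (discount[t + m]'htm) 0 (· + 1) else st.1 with hc1
    set c2 := if c1.contains (discount[m]'hmlen)
        then c1.modify (discount[m]'hmlen) 0 (· - 1) else c1 with hc2
    have hstep : slideStep need (t:Int) discount st ((t:Int) + (m:Int))
        = (c2, if pyDictEq c2 need then st.2 + 1 else st.2) := by
      simp only [slideStep, hinc, hout, hc1, hc2]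
    rw [hstep]
    have hc1k : c1.keys = need.keys := by rw [hc1, gupdate_keys, ihk]
    have hc2k : c2.keys = need.keys := by rw [hc2, gupdate_keys, hc1k]
    have hc1v : ∀ k ∈ need.keys, c1.getD k 0
        = st.1.getD k 0 + (if discount[t + m]'htm = k then 1 else 0) := by
      intro k hk
      rw [hc1, gupdate_getD st.1 _ _ k (ihk ▸ hk)]
      by_cases h : discount[t + m]'htm = k <;> simp [h]
    have hc2v : ∀ k ∈ need.keys, c2.getD k 0 = (wcnt discount t (m+1) k : Int) := by
      intro k hk
      rw [hc2, gupdate_getD c1 _ _ k (hc1k ▸ hk), hc1v k hk, ihv k hk]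
      rw [wcnt_succ discount t m ht (by omega) k]
      by_cases h1 : discount[t + m]'htm = k <;> by_cases h2 : discount[m]'hmlen = k <;>
        simp [h1, h2] <;> ring
    have heq : pyDictEq c2 need = goodW need discount t (m+1) := by
      rw [Bool.eq_iff_iff]
      rw [pyDictEq_iff c2 need hc2k hn]
      simp only [goodW, List.all_eq_true, beq_iff_eq]
      constructor
      · intro h k hk
        rw [← hc2v k hk]
        exact h k hk
      · intro h k hk
        rw [hc2v k hk]
        exact h k hk
    refine ⟨hc2k, hc2v, ?_⟩
    rw [heq, ihc, List.range_succ, List.countP_append]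
    simp only [List.countP_cons, List.countP_nil]
    by_cases hg : goodW need discount t (m+1) = true <;> simp [hg] <;> push_cast <;> ring


theorem needB_eq_zip (want : List String) (number : List Int)
    (h : want.length ≤ number.length) :
    (PySem.List.enumerate want).foldl
      (fun d p => d.insert p.2 (PySem.List.pyGetD number p.1 0)) PySem.Dict.empty
    = (want.zip number).foldl (fun d p => d.insert p.1 p.2) PySem.Dict.empty := by
  rw [PySem.List.enumerate_eq_map_pyRange want ""]
  rw [List.foldl_map]
  exact dic_eq_need want number h

theorem solution_main (want : List String) (number : List Int) (discount : List String)
    (hlen : want.length ≤ number.length) (hsum : 1 ≤ number.sum) :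
    solution want number discount = solution_alt want number discount := by
  have hdic := dic_eq_need want number hlen
  have hneedB := needB_eq_zip want number hlen
  set need := (want.zip number).foldl (fun d p => d.insert p.1 p.2) PySem.Dict.empty with hneed
  set t : Nat := number.sum.toNat with htdef
  have htpos : 1 ≤ t := by omega
  have hl : number.sum = (t : Int) := by omega
  unfold solution solution_alt
  simp only []
  rw [hdic, hneedB, hl]
  rw [solutionGo_spec]
  rw [show ((discount.length : Int)).toNat = discount.length by omega]
  by_cases hbig : ((t : Int) > (discount.length : Int))
  · rw [if_pos (Or.inl hbig)]
    have hz : ((List.range discount.length).countP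
        (fun (m : Nat) => decide ((0:Int) + (m:Int) + (t:Int) ≤ (discount.length:Int))
          && goodA need (t:Int) discount ((0:Int) + (m:Int)))) = 0 := by
      apply List.countP_eq_zero.mpr
      intro m _
      have hcon : ¬ ((0:Int) + (m:Int) + (t:Int) ≤ (discount.length:Int)) := by omega
      simp [hcon]
      intro h
      exfalso
      omega
    rw [hz]
    simp
  · rw [if_neg (by push_cast; omega)]
    have htle : t ≤ discount.length := by omega
    have hK : need.keys.Nodup := by
      rw [hneed]
      exact PySem.Dict.nodup_keys_foldl_insert_key (want.zip number) Prod.fst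
        (fun _ p => p.2) PySem.Dict.empty (by simp [PySem.Dict.keys, PySem.Dict.empty])
    set cur0 := need.keys.foldl (fun d k => d.insert k (0 : Int)) PySem.Dict.empty with hcur0
    have hitems : cur0.items = need.keys.map (fun k => (k, (0:Int))) := by
      rw [hcur0]
      have := PySem.Dict.items_foldl_insert_fresh need.keys (fun a => a) (fun _ => (0:Int))
        PySem.Dict.empty (by intro a _; simp [PySem.Dict.contains_empty])
        (by simpa using hK)
      simpa [PySem.Dict.empty] using this
    have hc0k : cur0.keys = need.keys := by
      simp [PySem.Dict.keys, hitems, List.map_map, Function.comp_def]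
    have hc0v : ∀ k ∈ need.keys, cur0.getD k 0 = 0 := by
      intro k hk
      exact PySem.Dict.getD_of_mem_items cur0
        (by rw [hitems, List.mem_map]; exact ⟨k, hk, rfl⟩) (hc0k ▸ hK) 0
    rw [PySem.List.slice_to discount (by positivity)]
    rw [show ((t:Int)).toNat = t by omega]
    set cur1 := (discount.take t).foldl
      (fun d item => if d.contains item then d.modify item 0 (· + 1) else d) cur0 with hcur1
    have hc1k : cur1.keys = need.keys := by rw [hcur1, guardedFold_keys, hc0k]
    have hc1v : ∀ k ∈ need.keys, cur1.getD k 0 = (wcnt discount t 0 k : Int) := by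
      intro k hk
      rw [hcur1, guardedFold_getD (discount.take t) cur0 k
        (by rw [PySem.Dict.contains_eq_decide_mem_keys, hc0k]; simp [hk])]
      rw [hc0v k hk]
      simp [wcnt]
    have hcnt0 : pyDictEq cur1 need = goodW need discount t 0 := by
      rw [Bool.eq_iff_iff, pyDictEq_iff cur1 need hc1k hK]
      simp only [goodW, List.all_eq_true, beq_iff_eq]
      constructor
      · intro h k hk; rw [← hc1v k hk]; exact h k hk
      · intro h k hk; rw [hc1v k hk]; exact h k hk
    set M : Nat := discount.length - t with hM
    have hrange : (discount.length : Int) = (t:Int) + (M:Int) := by omega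
    conv_rhs => rw [hrange]
    have hslide := slide_spec need discount t htpos hK cur1
      (if pyDictEq cur1 need then (1:Int) else 0) hc1k hc1v M (by omega)
    rw [hslide.2.2]
    -- A's test equals B's test
    have hAB : ∀ m : Nat, m + t ≤ discount.length →
        goodA need (t:Int) discount ((0:Int) + (m:Int)) = goodW need discount t m := by
      intro m _
      simp only [goodA, goodW]
      congr 1
      funext p
      rw [zero_add]
      rw [PySem.List.slice_natCast_add discount m t]
      rfl
    -- reduce the A-side count to the windows that exist
    have hsplitlen : discount.length = (M + 1) + (discount.length - (M+1)) := by omega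
    have hcountA : ((List.range discount.length).countP
        (fun (m : Nat) => decide ((0:Int) + (m:Int) + (t:Int) ≤ (discount.length:Int))
          && goodA need (t:Int) discount ((0:Int) + (m:Int))))
        = (List.range (M+1)).countP (fun m => goodW need discount t m) := by
      have hr : List.range discount.length
          = List.range (M+1) ++ (List.range (discount.length - (M+1))).map (fun x => (M+1) + x) := by
        conv_lhs => rw [hsplitlen]
        rw [List.range_add]
      rw [hr, List.countP_append]
      have h2 : ((List.range (discount.length - (M+1))).map (fun x => (M+1) + x)).countP
          (fun (m : Nat) => decide ((0:Int) + (m:Int) + (t:Int) ≤ (discount.length:Int))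
            && goodA need (t:Int) discount ((0:Int) + (m:Int))) = 0 := by
        apply List.countP_eq_zero.mpr
        intro m hm
        rw [List.mem_map] at hm
        obtain ⟨x, _, rfl⟩ := hm
        have : ¬ ((0:Int) + ((M+1+x : Nat):Int) + (t:Int) ≤ (discount.length:Int)) := by
          push_cast
          omega
        simp [this]
        intro h
        exfalso
        push_cast at this
        omega
      rw [h2, Nat.add_zero]
      apply List.countP_congr
      intro m hm
      rw [List.mem_range] at hm
      have hd : ((0:Int) + (m:Int) + (t:Int) ≤ (discount.length:Int)) := by
        push_cast
        omega
      rw [hAB m (by omega)]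
      simp [hd]
      intro _
      omega
    rw [hcountA]
    -- peel off window 0
    have hpeel : (List.range (M+1)).countP (fun m => goodW need discount t m)
        = ((if goodW need discount t 0 then 1 else 0)
          + (List.range M).countP (fun j => goodW need discount t (j+1))) := by
      rw [show M + 1 = 1 + M by ring, List.range_add, List.countP_append, List.countP_map]
      have h1 : (List.range 1).countP (fun m => goodW need discount t m)
          = (if goodW need discount t 0 then 1 else 0) := by
        simp [List.range_one, List.countP_cons]
      rw [h1]
      congr 1
      apply List.countP_congr
      intro j _
      simp [Function.comp_def, Nat.add_comm 1 j]
    rw [hpeel, hcnt0]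
    by_cases hg : goodW need discount t 0 = true <;> simp [hg] <;> push_cast <;> ring

-- ===== VERDICT (by name: the statement is the Claim_ definition above) =====
theorem solution_spec : Claim_equal_solution := by
  intro want number discount _ hpre
  exact solution_main want number discount hpre.1 hpre.2
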